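-- pv_equiv track=rewrite | github.com/Zloaq/IRSFspec_reduction | irsfspec_reduction.py | search_combination_with_diff_label
-- ===== SOURCE A (Python) =====
-- from itertools import combinations
-- from typing import Dict, List, Set, Tuple
--
-- def search_combination_with_diff_label(
--         label_dict: Dict[str, str],
--     ) -> List[Tuple[str, str]]:
--
--     results: List[Tuple[str, str]] = []
--
--     for no1, no2 in combinations(sorted(label_dict.keys()), 2):
--         # ラベルが同じならスキップ
--         if label_dict[no1] == label_dict[no2]:
--             continue
--         results.append((no1, no2))
--
--     return results
-- ===== SOURCE B (Python) =====
-- def search_combination_with_diff_label(label_dict):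
--     # Group keys by label, then cross-product distinct label groups and sort.
--     groups = {}
--     for key, lab in label_dict.items():
--         groups.setdefault(lab, []).append(key)
--     gs = list(groups.values())
--     pairs = []
--     for i, g1 in enumerate(gs):
--         for g2 in gs[i + 1:]:
--             for a in g1:
--                 for b in g2:
--                     pairs.append((a, b) if a < b else (b, a))
--     pairs.sort()
--     return pairs
-- ===== Notes on version B (the rewrite author's own statement) =====
-- stated objective: alternative
-- what changed: B indexes keys by label into a dict of groups, emits the cross-product of every pair of distinct label groups (each pair oriented (min,max)), and sorts the result, instead of A's scan over all sorted-key combinations skipping equal labels.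
import Mathlib
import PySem

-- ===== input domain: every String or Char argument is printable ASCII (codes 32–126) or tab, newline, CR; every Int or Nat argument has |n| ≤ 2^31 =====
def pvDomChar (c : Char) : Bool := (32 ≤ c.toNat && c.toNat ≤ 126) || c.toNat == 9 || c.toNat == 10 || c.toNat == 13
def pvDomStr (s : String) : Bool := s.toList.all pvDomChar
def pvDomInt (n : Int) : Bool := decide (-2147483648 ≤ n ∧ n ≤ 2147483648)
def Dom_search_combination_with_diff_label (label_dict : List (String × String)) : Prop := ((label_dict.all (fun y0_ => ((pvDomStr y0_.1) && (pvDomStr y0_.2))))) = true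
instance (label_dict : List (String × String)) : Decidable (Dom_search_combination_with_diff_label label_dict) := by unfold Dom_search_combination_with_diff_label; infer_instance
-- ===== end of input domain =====

-- B groups the keys by label, crosses every pair of distinct label groups into (min,max)-oriented
-- pairs and sorts the result, instead of A's filtered scan over all sorted-key combinations.


-- ===== PORT A =====
-- literal port of A; d[no1] is ported as getD d no1 "" — no1/no2 are d's own keys, so no KeyError arises
def search_combination_with_diff_label (label_dict : List (String × String)) : List (String × String) :=
  let d := PySem.Dict.ofList label_dict
  (PySem.List.combinations (PySem.List.sorted (PySem.Dict.keys d) (fun k => k) false) 2).foldl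
    (fun results c =>
      match c with
      | [no1, no2] =>
        if PySem.Dict.getD d no1 "" == PySem.Dict.getD d no2 "" then results
        else results ++ [(no1, no2)]
      | _ => results) []

-- ===== PORT B =====
-- inner two loops of Source B: every cross pair of two groups, oriented (min, max)
def pvCross (g1 g2 : List String) : List (String × String) :=
  g1.flatMap (fun a => g2.map (fun b => if a < b then (a, b) else (b, a)))

-- outer two loops of Source B: 'for i, g1 in enumerate(gs): for g2 in gs[i+1:]'
def pvRawPairs : List (List String) → List (String × String)
  | [] => []
  | g1 :: rest => rest.flatMap (fun g2 => pvCross g1 g2) ++ pvRawPairs rest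

def search_combination_with_diff_label_alt (label_dict : List (String × String)) : List (String × String) :=
  let d := PySem.Dict.ofList label_dict
  let groups := (PySem.Dict.items d).foldl
    (fun g p => PySem.Dict.modify g p.2 [] (fun l => l ++ [p.1])) PySem.Dict.empty
  PySem.List.sorted2 (pvRawPairs (PySem.Dict.values groups)) (fun p => p.1) (fun p => p.2) false

-- ===== PRECONDITION & SPEC =====
def Spec_search_combination_with_diff_label (label_dict : List (String × String)) (out : List (String × String)) : Prop := out = search_combination_with_diff_label_alt label_dict
instance (label_dict : List (String × String)) (out : List (String × String)) : Decidable (Spec_search_combination_with_diff_label label_dict out) := by unfold Spec_search_combination_with_diff_label; infer_instance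

-- ===== CLAIM (what is proved, stated in full; the proofs are below) =====
def Claim_equal_search_combination_with_diff_label : Prop := ∀ (label_dict : List (String × String)), Dom_search_combination_with_diff_label label_dict → Spec_search_combination_with_diff_label label_dict (search_combination_with_diff_label label_dict)

-- ===== LEMMAS AND PROOFS =====
def pvPairs2 {α : Type} : List α → List (α × α)
  | [] => []
  | x :: t => t.map (fun y => (x, y)) ++ pvPairs2 t

theorem pvRawPairs_eq_flatMap (l : List (List String)) :
    pvRawPairs l = (pvPairs2 l).flatMap (fun q => pvCross q.1 q.2) := by
  induction l with
  | nil => rfl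
  | cons g t ih => simp [pvRawPairs, pvPairs2, ih, List.flatMap_append, List.flatMap_map]

theorem pvNodup_pairwise_idxOf {α : Type} [BEq α] [LawfulBEq α] {l : List α} (h : l.Nodup) :
    l.Pairwise (fun a b => List.idxOf a l < List.idxOf b l) := by
  rw [List.pairwise_iff_getElem]
  intro i j hi hj hij
  rw [List.Nodup.idxOf_getElem h i hi, List.Nodup.idxOf_getElem h j hj]
  exact hij

-- the group of label c: keys of d carrying label c, in items order
def pvGlab (d : PySem.Dict String String) (c : String) : List String :=
  (d.items.filter (fun p => p.2 == c)).map (fun p => p.1)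

theorem pvMem_glab {d : PySem.Dict String String} (hnd : d.keys.Nodup) {u c : String} :
    u ∈ pvGlab d c ↔ u ∈ d.keys ∧ d.getD u "" = c := by
  constructor
  · intro h
    obtain ⟨p, hp, rfl⟩ := List.mem_map.mp h
    obtain ⟨hpm, hpc⟩ := List.mem_filter.mp hp
    have hc : p.2 = c := by simpa using hpc
    refine ⟨?_, ?_⟩
    · exact List.mem_map.mpr ⟨p, hpm, rfl⟩
    · rw [← hc]
      exact PySem.Dict.getD_of_mem_items d (by exact hpm) hnd ""
  · rintro ⟨hk, hc⟩
    obtain ⟨p, hpm, hp1⟩ := List.mem_map.mp hk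
    have hv : d.getD p.1 "" = p.2 := PySem.Dict.getD_of_mem_items d (by exact hpm) hnd ""
    have : p.2 = c := by rw [← hv, hp1, hc]
    exact List.mem_map.mpr ⟨p, List.mem_filter.mpr ⟨hpm, by simp [this]⟩, hp1⟩

theorem pvGlab_nodup {d : PySem.Dict String String} (hnd : d.keys.Nodup) (c : String) :
    (pvGlab d c).Nodup := by
  have hsub : (pvGlab d c).Sublist (d.items.map (fun p => p.1)) := by
    unfold pvGlab
    exact List.Sublist.map (fun p => p.1)
      (List.filter_sublist (l := d.items) (p := fun p => p.2 == c))
  have hk : d.keys = d.items.map (fun p => p.1) := by simp [PySem.Dict.keys]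
  exact hsub.nodup (hk ▸ hnd)

def pvGroups (d : PySem.Dict String String) : PySem.Dict String (List String) :=
  d.items.foldl (fun g p => PySem.Dict.modify g p.2 [] (fun l => l ++ [p.1])) PySem.Dict.empty

theorem pvGroups_getD (d : PySem.Dict String String) (c : String) :
    (pvGroups d).getD c [] = pvGlab d c := by
  have h1 : pvGroups d
      = (d.items.map (fun q : String × String => (q.2, q.1))).foldl
          (fun g q => PySem.Dict.modify g q.1 [] (fun x => x ++ [q.2])) PySem.Dict.empty := by
    rw [List.foldl_map]; rfl
  rw [h1, PySem.Dict.getD_foldl_modify_append]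
  simp [pvGlab, PySem.Dict.getD_empty, List.filter_map, Function.comp_def]

theorem pvGroups_keys_nodup (d : PySem.Dict String String) : (pvGroups d).keys.Nodup := by
  unfold pvGroups
  exact PySem.Dict.nodup_keys_foldl_modify_key d.items (fun p => p.2) []
    (fun g p l => l ++ [p.1]) PySem.Dict.empty PySem.Dict.nodup_keys_empty

theorem pvMem_groups_keys (d : PySem.Dict String String) (c : String) :
    c ∈ (pvGroups d).keys ↔ c ∈ d.items.map (fun p => p.2) := by
  unfold pvGroups
  rw [PySem.Dict.keys_foldl_modify_key d.items (fun p => p.2) []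
    (fun g p l => l ++ [p.1]) PySem.Dict.empty]
  rw [show PySem.Dict.empty.keys = ([] : List String) from rfl, PySem.Set.update_nil_left]
  exact PySem.Set.mem_ofList _ c

theorem pvGroups_values (d : PySem.Dict String String) :
    (pvGroups d).values = (pvGroups d).keys.map (pvGlab d) := by
  rw [PySem.Dict.values_eq_map_keys (pvGroups d) (pvGroups_keys_nodup d) []]
  exact List.map_congr_left (fun c _ => pvGroups_getD d c)

theorem pvPairs2_rel {α : Type} {R : α → α → Prop} {l : List α} (h : l.Pairwise R) :
    ∀ p ∈ pvPairs2 l, R p.1 p.2 ∧ p.1 ∈ l ∧ p.2 ∈ l := by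
  induction l with
  | nil => intro p hp; simp [pvPairs2] at hp
  | cons x t ih =>
    intro p hp
    simp only [pvPairs2, List.mem_append, List.mem_map] at hp
    rcases hp with ⟨y, hy, rfl⟩ | hp
    · exact ⟨(List.pairwise_cons.mp h).1 y hy, by simp, by simp [hy]⟩
    · obtain ⟨h1, h2, h3⟩ := ih (List.pairwise_cons.mp h).2 p hp
      exact ⟨h1, by simp [h2], by simp [h3]⟩

theorem pvPairs2_pairwise {α : Type} {R : α → α → Prop} {l : List α} (h : l.Pairwise R) :
    (pvPairs2 l).Pairwise (fun p q => R p.1 q.1 ∨ (p.1 = q.1 ∧ R p.2 q.2)) := by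
  induction l with
  | nil => exact List.Pairwise.nil
  | cons x t ih =>
    obtain ⟨hx, ht⟩ := List.pairwise_cons.mp h
    refine List.pairwise_append.mpr ⟨?_, ih ht, ?_⟩
    · refine List.pairwise_map.mpr ?_
      exact (List.pairwise_map.mp (List.pairwise_map.mpr ht)).imp
        (fun {a b} hr => Or.inr ⟨rfl, hr⟩) |>.imp id
    · intro p hp q hq
      obtain ⟨y, hy, rfl⟩ := List.mem_map.mp hp
      obtain ⟨_, hq1, _⟩ := pvPairs2_rel ht q hq
      exact Or.inl (hx q.1 hq1)

theorem pvOrdered_inj {a b a' b' : String} (h :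
    (if a < b then (a, b) else (b, a)) = (if a' < b' then (a', b') else (b', a'))) :
    (a = a' ∧ b = b') ∨ (a = b' ∧ b = a') := by
  by_cases h1 : a < b <;> by_cases h2 : a' < b' <;>
    simp [h1, h2, Prod.ext_iff] at h <;> tauto

theorem pvMem_pairs2_of_lt {l : List String} (h : l.Pairwise (· < ·))
    {u v : String} (hu : u ∈ l) (hv : v ∈ l) (huv : u < v) : (u, v) ∈ pvPairs2 l := by
  induction l with
  | nil => simp at hu
  | cons x t ih =>
    obtain ⟨hx, ht⟩ := List.pairwise_cons.mp h
    simp only [List.mem_cons] at hu hv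
    simp only [pvPairs2, List.mem_append, List.mem_map]
    rcases hu with rfl | hu
    · rcases hv with rfl | hv
      · exact absurd huv (lt_irrefl _)
      · exact Or.inl ⟨v, hv, rfl⟩
    · rcases hv with rfl | hv
      · exact absurd (hx u hu) (not_lt_of_gt huv)
      · exact Or.inr (ih ht hu hv)

theorem pvMem_pairs2_or {α : Type} {l : List α} (hnd : l.Nodup)
    {a b : α} (ha : a ∈ l) (hb : b ∈ l) (hab : a ≠ b) :
    (a, b) ∈ pvPairs2 l ∨ (b, a) ∈ pvPairs2 l := by
  induction l with
  | nil => simp at ha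
  | cons x t ih =>
    obtain ⟨hx, ht⟩ := List.nodup_cons.mp hnd
    simp only [List.mem_cons] at ha hb
    simp only [pvPairs2, List.mem_append, List.mem_map]
    rcases ha with rfl | ha
    · rcases hb with rfl | hb
      · exact absurd rfl hab
      · exact Or.inl (Or.inl ⟨b, hb, rfl⟩)
    · rcases hb with rfl | hb
      · exact Or.inr (Or.inl ⟨a, ha, rfl⟩)
      · rcases ih ht ha hb with h | h
        · exact Or.inl (Or.inr h)
        · exact Or.inr (Or.inr h)

-- property P that characterises membership in both pair lists
def pvP (d : PySem.Dict String String) (p : String × String) : Prop :=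
  p.1 < p.2 ∧ p.1 ∈ d.keys ∧ p.2 ∈ d.keys ∧ d.getD p.1 "" ≠ d.getD p.2 ""

theorem pvMem_rawPairs {d : PySem.Dict String String} (hnd : d.keys.Nodup) (p : String × String) :
    p ∈ pvRawPairs (pvGroups d).values ↔ pvP d p := by
  have hgs : (pvGroups d).values = (pvGroups d).keys.map (pvGlab d) := pvGroups_values d
  have hginj : ∀ c1 ∈ (pvGroups d).keys, ∀ c2 ∈ (pvGroups d).keys,
      pvGlab d c1 = pvGlab d c2 → c1 = c2 := by
    intro c1 hc1 c2 hc2 heq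
    obtain ⟨q, hq, hq2⟩ := List.mem_map.mp ((pvMem_groups_keys d c1).mp hc1)
    have hu1 : q.1 ∈ pvGlab d c1 := (pvMem_glab hnd).mpr
      ⟨List.mem_map.mpr ⟨q, hq, rfl⟩, by rw [PySem.Dict.getD_of_mem_items d (by simpa using hq) hnd]; exact hq2⟩
    have hu2 := (pvMem_glab hnd).mp (heq ▸ hu1)
    have := (pvMem_glab hnd).mp hu1
    rw [← this.2, hu2.2]
  have hgs_nodup : (pvGroups d).values.Nodup := by
    rw [hgs]; exact List.Nodup.map_on hginj (pvGroups_keys_nodup d)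
  rw [pvRawPairs_eq_flatMap]
  constructor
  · intro hp
    obtain ⟨q, hq, hpq⟩ := List.mem_flatMap.mp hp
    obtain ⟨hne, hq1, hq2⟩ := pvPairs2_rel (R := (· ≠ ·)) hgs_nodup q hq
    rw [hgs] at hq1 hq2
    obtain ⟨c1, hc1, hg1⟩ := List.mem_map.mp hq1
    obtain ⟨c2, hc2, hg2⟩ := List.mem_map.mp hq2
    unfold pvCross at hpq
    obtain ⟨a, ha, hm⟩ := List.mem_flatMap.mp hpq
    obtain ⟨b, hb, hab⟩ := List.mem_map.mp hm
    rw [← hg1] at ha; rw [← hg2] at hb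
    obtain ⟨hak, hal⟩ := (pvMem_glab hnd).mp ha
    obtain ⟨hbk, hbl⟩ := (pvMem_glab hnd).mp hb
    have hc12 : c1 ≠ c2 := fun h => hne (by rw [← hg1, ← hg2, h])
    have hlab : d.getD a "" ≠ d.getD b "" := by rw [hal, hbl]; exact hc12
    have hne_ab : a ≠ b := fun h => hlab (by rw [h])
    by_cases hlt : a < b
    · rw [if_pos hlt] at hab
      rw [← hab]; exact ⟨hlt, hak, hbk, hlab⟩
    · rw [if_neg hlt] at hab
      have : b < a := (not_lt.mp hlt).lt_of_ne hne_ab.symm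
      rw [← hab]; exact ⟨this, hbk, hak, hlab.symm⟩
  · rintro ⟨hlt, hu, hv, hne⟩
    obtain ⟨u, v⟩ := p
    simp only at hlt hu hv hne
    have hc1 : d.getD u "" ∈ (pvGroups d).keys := by
      obtain ⟨q, hq, hq1⟩ := List.mem_map.mp hu
      rw [pvMem_groups_keys]
      refine List.mem_map.mpr ⟨q, hq, ?_⟩
      rw [← hq1, PySem.Dict.getD_of_mem_items d (by simpa using hq) hnd]
    have hc2 : d.getD v "" ∈ (pvGroups d).keys := by
      obtain ⟨q, hq, hq1⟩ := List.mem_map.mp hv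
      rw [pvMem_groups_keys]
      refine List.mem_map.mpr ⟨q, hq, ?_⟩
      rw [← hq1, PySem.Dict.getD_of_mem_items d (by simpa using hq) hnd]
    have hG1 : u ∈ pvGlab d (d.getD u "") := (pvMem_glab hnd).mpr ⟨hu, rfl⟩
    have hG2 : v ∈ pvGlab d (d.getD v "") := (pvMem_glab hnd).mpr ⟨hv, rfl⟩
    have hGne : pvGlab d (d.getD u "") ≠ pvGlab d (d.getD v "") := by
      intro h
      exact hne ((pvMem_glab hnd).mp (h ▸ hG1)).2
    have hm1 : pvGlab d (d.getD u "") ∈ (pvGroups d).values := by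
      rw [hgs]; exact List.mem_map.mpr ⟨_, hc1, rfl⟩
    have hm2 : pvGlab d (d.getD v "") ∈ (pvGroups d).values := by
      rw [hgs]; exact List.mem_map.mpr ⟨_, hc2, rfl⟩
    rcases pvMem_pairs2_or hgs_nodup hm1 hm2 hGne with h | h
    · refine List.mem_flatMap.mpr ⟨_, h, ?_⟩
      unfold pvCross
      exact List.mem_flatMap.mpr ⟨u, hG1, List.mem_map.mpr ⟨v, hG2, by rw [if_pos hlt]⟩⟩
    · refine List.mem_flatMap.mpr ⟨_, h, ?_⟩
      unfold pvCross
      exact List.mem_flatMap.mpr ⟨v, hG2, List.mem_map.mpr ⟨u, hG1, by rw [if_neg (not_lt.mpr (le_of_lt hlt))]⟩⟩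

theorem pvCross_nodup {d : PySem.Dict String String} (hnd : d.keys.Nodup)
    {c1 c2 : String} (hc : c1 ≠ c2) : (pvCross (pvGlab d c1) (pvGlab d c2)).Nodup := by
  unfold pvCross
  rw [List.nodup_flatMap]
  constructor
  · intro a ha
    refine List.Nodup.map_on ?_ (pvGlab_nodup hnd c2)
    intro b hb b' hb' heq
    rcases pvOrdered_inj heq with ⟨_, h⟩ | ⟨h1, h2⟩
    · exact h
    · exfalso
      have : d.getD a "" = c2 := ((pvMem_glab hnd).mp (h1 ▸ hb')).2
      exact hc (((pvMem_glab hnd).mp ha).2 ▸ this ▸ rfl)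
  · refine ((pvGlab_nodup hnd c1).imp_of_mem ?_)
    intro a a' ha ha' hne x hx hx'
    obtain ⟨b, hb, hab⟩ := List.mem_map.mp hx
    obtain ⟨b', hb', hab'⟩ := List.mem_map.mp hx'
    rcases pvOrdered_inj (hab.trans hab'.symm) with ⟨h1, _⟩ | ⟨h1, h2⟩
    · exact hne h1
    · have : d.getD a "" = c2 := ((pvMem_glab hnd).mp (h1 ▸ hb')).2
      exact hc (((pvMem_glab hnd).mp ha).2 ▸ this ▸ rfl)

theorem pvRawPairs_nodup {d : PySem.Dict String String} (hnd : d.keys.Nodup) :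
    (pvRawPairs (pvGroups d).values).Nodup := by
  have hgs : (pvGroups d).values = (pvGroups d).keys.map (pvGlab d) := pvGroups_values d
  have hginj : ∀ c1 ∈ (pvGroups d).keys, ∀ c2 ∈ (pvGroups d).keys,
      pvGlab d c1 = pvGlab d c2 → c1 = c2 := by
    intro c1 hc1 c2 hc2 heq
    obtain ⟨q, hq, hq2⟩ := List.mem_map.mp ((pvMem_groups_keys d c1).mp hc1)
    have hu1 : q.1 ∈ pvGlab d c1 := (pvMem_glab hnd).mpr
      ⟨List.mem_map.mpr ⟨q, hq, rfl⟩, by rw [PySem.Dict.getD_of_mem_items d (by simpa using hq) hnd]; exact hq2⟩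
    have hu2 := (pvMem_glab hnd).mp (heq ▸ hu1)
    have := (pvMem_glab hnd).mp hu1
    rw [← this.2, hu2.2]
  have hgs_nodup : (pvGroups d).values.Nodup := by
    rw [hgs]; exact List.Nodup.map_on hginj (pvGroups_keys_nodup d)
  -- decode: every member of gs is a group of some label
  have hdecode : ∀ g ∈ (pvGroups d).values, ∃ c, g = pvGlab d c := by
    intro g hg
    rw [hgs] at hg
    obtain ⟨c, _, hc⟩ := List.mem_map.mp hg
    exact ⟨c, hc.symm⟩
  rw [pvRawPairs_eq_flatMap, List.nodup_flatMap]
  constructor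
  · intro q hq
    obtain ⟨hne, hq1, hq2⟩ := pvPairs2_rel (R := (· ≠ ·)) hgs_nodup q hq
    obtain ⟨c1, hg1⟩ := hdecode q.1 hq1
    obtain ⟨c2, hg2⟩ := hdecode q.2 hq2
    have hc12 : c1 ≠ c2 := fun h => hne (by rw [hg1, hg2, h])
    rw [hg1, hg2]
    exact pvCross_nodup hnd hc12
  · have hRpair := pvNodup_pairwise_idxOf hgs_nodup
    refine ((pvPairs2_pairwise hRpair).imp_of_mem ?_)
    intro q q' hq hq' hS
    obtain ⟨hneq, hq1, hq2⟩ := pvPairs2_rel (R := fun a b =>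
      List.idxOf a (pvGroups d).values < List.idxOf b (pvGroups d).values) hRpair q hq
    obtain ⟨hneq', hq1', hq2'⟩ := pvPairs2_rel (R := fun a b =>
      List.idxOf a (pvGroups d).values < List.idxOf b (pvGroups d).values) hRpair q' hq'
    intro x hx hx'
    obtain ⟨c1, hg1⟩ := hdecode q.1 hq1
    obtain ⟨c2, hg2⟩ := hdecode q.2 hq2
    obtain ⟨c1', hg1'⟩ := hdecode q'.1 hq1'
    obtain ⟨c2', hg2'⟩ := hdecode q'.2 hq2'
    unfold pvCross at hx hx'
    obtain ⟨a, ha, hm⟩ := List.mem_flatMap.mp hx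
    obtain ⟨b, hb, hab⟩ := List.mem_map.mp hm
    obtain ⟨a', ha', hm'⟩ := List.mem_flatMap.mp hx'
    obtain ⟨b', hb', hab'⟩ := List.mem_map.mp hm'
    rw [hg1] at ha; rw [hg2] at hb; rw [hg1'] at ha'; rw [hg2'] at hb'
    have hal := ((pvMem_glab hnd).mp ha).2
    have hbl := ((pvMem_glab hnd).mp hb).2
    have hal' := ((pvMem_glab hnd).mp ha').2
    have hbl' := ((pvMem_glab hnd).mp hb').2
    rcases pvOrdered_inj (hab.trans hab'.symm) with ⟨h1, h2⟩ | ⟨h1, h2⟩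
    · -- same pair of labels in the same order: q = q', contradicting S's strictness
      have hc1 : c1 = c1' := by rw [← hal, ← hal', h1]
      have hc2 : c2 = c2' := by rw [← hbl, ← hbl', h2]
      have hqq : q = q' := by
        have e1 : q.1 = q'.1 := by rw [hg1, hg1', hc1]
        have e2 : q.2 = q'.2 := by rw [hg2, hg2', hc2]
        exact Prod.ext e1 e2
      rcases hS with h | ⟨_, h⟩
      · rw [hqq] at h; exact lt_irrefl _ h
      · rw [hqq] at h; exact lt_irrefl _ h
    · -- swapped labels: q' = (q.2, q.1), contradicting the index order
      have hc1 : c1 = c2' := by rw [← hal, ← hbl', h1]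
      have hc2 : c2 = c1' := by rw [← hbl, ← hal', h2]
      have e1 : q'.1 = q.2 := by rw [hg1', hg2, hc2]
      have e2 : q'.2 = q.1 := by rw [hg2', hg1, hc1]
      have hswap : List.idxOf q.2 (pvGroups d).values < List.idxOf q.1 (pvGroups d).values := by
        rw [← e1, ← e2]; exact hneq'
      rcases hS with h | ⟨heq, h⟩
      · rw [e1] at h; exact Nat.lt_asymm h hswap
      · rw [heq, e1] at hswap; exact lt_irrefl _ hswap

theorem pvCombinations_two {α : Type} (l : List α) :
    PySem.List.combinations l 2 = (pvPairs2 l).map (fun p => [p.1, p.2]) := by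
  induction l with
  | nil => rfl
  | cons x t ih =>
    show PySem.List.combinations (x :: t) (1+1) = _
    rw [PySem.List.combinations_cons_succ, PySem.List.combinations_one, ih]
    simp [pvPairs2, Function.comp]

theorem pvFoldl_skip_if {α : Type} (c : α → Bool) (l : List α) (acc : List α) :
    l.foldl (fun acc p => if c p then acc else acc ++ [p]) acc
      = acc ++ l.filter (fun p => !c p) := by
  induction l generalizing acc with
  | nil => simp
  | cons x t ih =>
    by_cases h : c x = true <;> simp [List.foldl_cons, h, ih]

theorem pvSorted2_eq_sorted_lex (xs : List (String × String)) :
    PySem.List.sorted2 xs (fun p => p.1) (fun p => p.2) false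
      = PySem.List.sorted (κ := String ×ₗ String) xs (fun p => toLex (p.1, p.2)) false := by
  have hf : (fun p q : String × String => decide (p.1 < q.1) || (!decide (q.1 < p.1) && decide (p.2 < q.2)))
      = (fun p q : String × String => decide (toLex (p.1, p.2) < toLex (q.1, q.2))) := by
    funext p q
    rcases lt_trichotomy p.1 q.1 with h | h | h
    · simp [Prod.Lex.lt_iff, h]
    · simp [Prod.Lex.lt_iff, h]
    · simp [Prod.Lex.lt_iff, h, lt_asymm h, ne_of_gt h]
  simp only [PySem.List.sorted2, PySem.List.sorted, if_neg (by decide : ¬ (false = true))]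
  rw [hf]

theorem pvKs_pairwise_lt {d : PySem.Dict String String} (hnd : d.keys.Nodup) :
    (PySem.List.sorted d.keys (fun k => k) false).Pairwise (· < ·) := by
  have h1 : (PySem.List.sorted d.keys (fun k => k) false).Pairwise (· ≤ ·) :=
    PySem.List.sorted_pairwise d.keys (fun k => k)
  have h2 : (PySem.List.sorted d.keys (fun k => k) false).Nodup :=
    ((PySem.List.sorted_perm d.keys (fun k => k) false).nodup_iff).mpr hnd
  exact (h1.and h2).imp (fun h => lt_of_le_of_ne h.1 h.2)

theorem pvMem_Alist {d : PySem.Dict String String} (hnd : d.keys.Nodup) (p : String × String) :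
    p ∈ (pvPairs2 (PySem.List.sorted d.keys (fun k => k) false)).filter
        (fun p => !(PySem.Dict.getD d p.1 "" == PySem.Dict.getD d p.2 "")) ↔ pvP d p := by
  rw [List.mem_filter]
  constructor
  · rintro ⟨hmem, hne⟩
    obtain ⟨hlt, h1, h2⟩ := pvPairs2_rel (pvKs_pairwise_lt hnd) p hmem
    rw [PySem.List.mem_sorted] at h1 h2
    refine ⟨hlt, h1, h2, by simpa using hne⟩
  · rintro ⟨hlt, h1, h2, hne⟩
    obtain ⟨u, v⟩ := p
    refine ⟨pvMem_pairs2_of_lt (pvKs_pairwise_lt hnd)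
      ((PySem.List.mem_sorted _ _ _ _).mpr h1) ((PySem.List.mem_sorted _ _ _ _).mpr h2) hlt,
      by simpa using hne⟩

theorem pvAlist_pairwise {d : PySem.Dict String String} (hnd : d.keys.Nodup) :
    ((pvPairs2 (PySem.List.sorted d.keys (fun k => k) false)).filter
        (fun p => !(PySem.Dict.getD d p.1 "" == PySem.Dict.getD d p.2 ""))).Pairwise
      (fun p q => (toLex (p.1, p.2) : String ×ₗ String) < toLex (q.1, q.2)) := by
  have h := pvPairs2_pairwise (pvKs_pairwise_lt hnd)
  have h2 := List.Pairwise.sublist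
    (List.filter_sublist (l := pvPairs2 (PySem.List.sorted d.keys (fun k => k) false))
      (p := fun p => !(PySem.Dict.getD d p.1 "" == PySem.Dict.getD d p.2 ""))) h
  refine h2.imp ?_
  intro p q hr
  rw [Prod.Lex.lt_iff]
  exact hr

theorem pvEquiv (label_dict : List (String × String)) :
    search_combination_with_diff_label label_dict = search_combination_with_diff_label_alt label_dict := by
  have hnd : (PySem.Dict.ofList label_dict).keys.Nodup := PySem.Dict.nodup_keys_ofList label_dict
  show (PySem.List.combinations (PySem.List.sorted (PySem.Dict.keys (PySem.Dict.ofList label_dict)) (fun k => k) false) 2).foldl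
      (fun results c =>
        match c with
        | [no1, no2] =>
          if PySem.Dict.getD (PySem.Dict.ofList label_dict) no1 "" == PySem.Dict.getD (PySem.Dict.ofList label_dict) no2 "" then results
          else results ++ [(no1, no2)]
        | _ => results) []
    = PySem.List.sorted2 (pvRawPairs (pvGroups (PySem.Dict.ofList label_dict)).values) (fun p => p.1) (fun p => p.2) false
  rw [pvCombinations_two, List.foldl_map]
  have hfold := pvFoldl_skip_if
    (fun p : String × String => PySem.Dict.getD (PySem.Dict.ofList label_dict) p.1 ""
      == PySem.Dict.getD (PySem.Dict.ofList label_dict) p.2 "")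
    (pvPairs2 (PySem.List.sorted (PySem.Dict.keys (PySem.Dict.ofList label_dict)) (fun k => k) false)) []
  rw [show (fun (results : List (String × String)) (p : String × String) =>
      match [p.1, p.2] with
      | [no1, no2] =>
        if PySem.Dict.getD (PySem.Dict.ofList label_dict) no1 "" == PySem.Dict.getD (PySem.Dict.ofList label_dict) no2 "" then results
        else results ++ [(no1, no2)]
      | _ => results)
    = (fun (acc : List (String × String)) (p : String × String) =>
        if (fun p : String × String => PySem.Dict.getD (PySem.Dict.ofList label_dict) p.1 ""
            == PySem.Dict.getD (PySem.Dict.ofList label_dict) p.2 "") p then acc else acc ++ [p]) from rfl]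
  rw [hfold, pvSorted2_eq_sorted_lex]
  have hAnodup : ((pvPairs2 (PySem.List.sorted (PySem.Dict.keys (PySem.Dict.ofList label_dict)) (fun k => k) false)).filter
      (fun p => !(PySem.Dict.getD (PySem.Dict.ofList label_dict) p.1 "" == PySem.Dict.getD (PySem.Dict.ofList label_dict) p.2 ""))).Nodup := by
    refine ((pvAlist_pairwise hnd).imp ?_)
    intro p q h hpq
    rw [hpq] at h
    exact lt_irrefl _ h
  have hperm : ((pvPairs2 (PySem.List.sorted (PySem.Dict.keys (PySem.Dict.ofList label_dict)) (fun k => k) false)).filter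
      (fun p => !(PySem.Dict.getD (PySem.Dict.ofList label_dict) p.1 "" == PySem.Dict.getD (PySem.Dict.ofList label_dict) p.2 ""))).Perm
      (pvRawPairs (pvGroups (PySem.Dict.ofList label_dict)).values) := by
    rw [List.perm_ext_iff_of_nodup hAnodup (pvRawPairs_nodup hnd)]
    intro p
    rw [pvMem_Alist hnd, pvMem_rawPairs hnd]
  exact (PySem.List.sorted_eq_of_perm_of_pairwise_lt _ _ _ hperm (pvAlist_pairwise hnd)).symm

-- ===== VERDICT (by name: the statement is the Claim_ definition above) =====
theorem search_combination_with_diff_label_spec : Claim_equal_search_combination_with_diff_label := by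
  intro label_dict _
  exact pvEquiv label_dict
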